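-- pv_equiv track=rewrite | github.com/DyOoij/Advent-Of-Code | 2023/Python/2023_12.py | CheckAgainstReq
-- ===== SOURCE A (Python) =====
-- def CheckAgainstReq(ListOfSprings, Req):
--     ValidConfigs = 0
--     RestructReq = []
--
--     for j in Req.split(','):
--         if j.isnumeric():
--             RestructReq.append(int(j))
--
--     for Spring in ListOfSprings:
--         OnlyBroken = []
--         Chopped = Spring.split(".")
--
--         for Entry in Chopped:
--             if Entry != '':
--                 OnlyBroken.append(len(Entry))
--
--         if OnlyBroken == RestructReq:
--             ValidConfigs += 1
--
--     return ValidConfigs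
-- ===== SOURCE B (Python) =====
-- def CheckAgainstReq(ListOfSprings, Req):
--     RestructReq = [int(j) for j in Req.split(',') if j.isnumeric()]
--     ValidConfigs = 0
--     for Spring in ListOfSprings:
--         groups = []
--         run = 0
--         for ch in Spring:
--             if ch != '.':
--                 run += 1
--             elif run:
--                 groups.append(run)
--                 run = 0
--         if run:
--             groups.append(run)
--         if groups == RestructReq:
--             ValidConfigs += 1
--     return ValidConfigs
-- ===== Notes on version B (the rewrite author's own statement) =====
-- stated objective: alternative
-- what changed: Replaces per-spring split('.') + filter + len over the resulting pieces by a single character scan that maintains a run counter and emits group lengths directly (the requirement parse becomes a comprehension); no intermediate list of substrings is built.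
import Mathlib
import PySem

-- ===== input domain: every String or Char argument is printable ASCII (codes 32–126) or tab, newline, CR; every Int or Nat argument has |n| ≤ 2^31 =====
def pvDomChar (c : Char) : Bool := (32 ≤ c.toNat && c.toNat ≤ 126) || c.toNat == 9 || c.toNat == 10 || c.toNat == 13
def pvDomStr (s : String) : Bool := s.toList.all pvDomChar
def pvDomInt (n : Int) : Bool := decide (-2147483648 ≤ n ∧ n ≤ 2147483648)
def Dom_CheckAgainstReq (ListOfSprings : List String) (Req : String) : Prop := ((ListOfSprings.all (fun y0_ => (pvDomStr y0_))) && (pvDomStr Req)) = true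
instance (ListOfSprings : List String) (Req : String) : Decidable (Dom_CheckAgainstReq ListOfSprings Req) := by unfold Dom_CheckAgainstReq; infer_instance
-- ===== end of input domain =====

-- B replaces the per-spring split('.')+filter+len pass by a single character scan with a run counter; same cost, different decomposition.

-- ===== PORT A =====
-- j.isnumeric() is ported as strIsdigit (identical on the ASCII domain); int(j) always succeeds when
-- strIsdigit j, and Req.split(',') always returns (sep ≠ ""), so the two getD defaults are never used.
def CheckAgainstReq (ListOfSprings : List String) (Req : String) : Int :=
  let RestructReq : List Int :=
    ((PySem.Str.split? Req ",").getD []).foldl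
      (fun acc j => if PySem.Str.strIsdigit j then acc ++ [(PySem.Int.ofStr? j).getD 0] else acc) []
  ListOfSprings.foldl (fun ValidConfigs Spring =>
    let Chopped := (PySem.Str.split? Spring ".").getD []
    let OnlyBroken := Chopped.foldl
      (fun ob Entry => if Entry ≠ "" then ob ++ [PySem.Str.len Entry] else ob) []
    if OnlyBroken = RestructReq then ValidConfigs + 1 else ValidConfigs) 0

-- ===== PORT B =====
-- one step of B's character scan: non-'.' extends the current run, '.' flushes a positive run
def altStep (st : List Int × Int) (c : Char) : List Int × Int :=
  if c ≠ '.' then (st.1, st.2 + 1)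
  else if st.2 > 0 then (st.1 ++ [st.2], 0) else (st.1, 0)

-- group lengths of a spring by a single scan, flushing the trailing run
def altGroups (Spring : String) : List Int :=
  let st := Spring.toList.foldl altStep ([], 0)
  if st.2 > 0 then st.1 ++ [st.2] else st.1

def CheckAgainstReq_alt (ListOfSprings : List String) (Req : String) : Int :=
  let RestructReq : List Int :=
    (((PySem.Str.split? Req ",").getD []).filter PySem.Str.strIsdigit).map
      (fun j => (PySem.Int.ofStr? j).getD 0)
  ListOfSprings.foldl (fun ValidConfigs Spring =>
    if altGroups Spring = RestructReq then ValidConfigs + 1 else ValidConfigs) 0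

-- ===== PRECONDITION & SPEC =====
def Spec_CheckAgainstReq (ListOfSprings : List String) (Req : String) (out : Int) : Prop := out = CheckAgainstReq_alt ListOfSprings Req
instance (ListOfSprings : List String) (Req : String) (out : Int) : Decidable (Spec_CheckAgainstReq ListOfSprings Req out) := by unfold Spec_CheckAgainstReq; infer_instance

-- ===== CLAIM (what is proved, stated in full; the proofs are below) =====
def Claim_equal_CheckAgainstReq : Prop := ∀ (ListOfSprings : List String) (Req : String), Dom_CheckAgainstReq ListOfSprings Req → Spec_CheckAgainstReq ListOfSprings Req (CheckAgainstReq ListOfSprings Req)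

-- ===== LEMMAS AND PROOFS =====

-- reference recursion for splitting a char list at '.', carrying the reversed current piece
def splitDotAux : List Char → List Char → List (List Char)
  | [], cur => [cur.reverse]
  | c :: rest, cur => if c = '.' then cur.reverse :: splitDotAux rest [] else splitDotAux rest (c :: cur)

theorem splitOn_go_dot (fuel : Nat) : ∀ (l cur : List Char) (acc : List (List Char)), l.length ≤ fuel →
    PySem.Chars.splitOn.go ['.'] fuel l cur acc = acc.reverse ++ splitDotAux l cur := by
  induction fuel with
  | zero =>
    intro l cur acc h
    have : l = [] := List.eq_nil_of_length_eq_zero (Nat.le_zero.mp h)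
    subst this
    simp [PySem.Chars.splitOn.go, splitDotAux]
  | succ n ih =>
    intro l cur acc h
    cases l with
    | nil => simp [PySem.Chars.splitOn.go, splitDotAux]
    | cons c rest =>
      simp only [PySem.Chars.splitOn.go]
      by_cases hc : c = '.'
      · subst hc
        rw [if_pos (by simp [List.isPrefixOf])]
        simp only [List.length_singleton, List.drop_succ_cons, List.drop_zero]
        rw [ih rest [] _ (by simp at h; omega)]
        simp [splitDotAux]
      · rw [if_neg (by simp [List.isPrefixOf]; intro h'; exact hc h'.symm)]
        rw [ih rest (c :: cur) acc (by simp at h; omega)]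
        simp [splitDotAux, hc]

theorem splitOn_dot (cs : List Char) : PySem.Chars.splitOn cs ['.'] = splitDotAux cs [] := by
  unfold PySem.Chars.splitOn
  rw [splitOn_go_dot _ _ _ _ (by omega)]
  simp

-- a Prop-ite version of PySem.List.foldl_append_if for A's inner loop
theorem foldl_append_ite {α β : Type} (p : α → Prop) [DecidablePred p] (f : α → β) (l : List α) (acc : List β) :
    l.foldl (fun acc x => if p x then acc ++ [f x] else acc) acc
      = acc ++ (l.filter (fun x => decide (p x))).map f := by
  induction l generalizing acc with
  | nil => simp
  | cons x xs ih =>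
    by_cases hx : p x <;> simp [hx, ih]

-- flushing the trailing run (the tail of altGroups, named for the proofs)
def altFinish (st : List Int × Int) : List Int :=
  if st.2 > 0 then st.1 ++ [st.2] else st.1

-- B's scan relative to the reference split: the run counter is the length of the pending piece
theorem scan_spec (cs : List Char) : ∀ (g : List Int) (cur : List Char),
    altFinish (cs.foldl altStep (g, (cur.length : Int)))
      = g ++ ((splitDotAux cs cur).filter (fun p => !p.isEmpty)).map (fun p => (p.length : Int)) := by
  induction cs with
  | nil =>
    intro g cur
    cases cur with
    | nil => simp [altFinish, splitDotAux]
    | cons a l =>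
      simp only [List.foldl_nil, splitDotAux, altFinish]
      rw [if_pos (by exact_mod_cast l.length.succ_pos)]
      simp
  | cons c rest ih =>
    intro g cur
    by_cases hc : c = '.'
    · subst hc
      simp only [List.foldl_cons, altStep, ne_eq, not_true_eq_false, if_false, splitDotAux]
      cases cur with
      | nil =>
        rw [if_neg (by simp)]
        have := ih g []
        simpa [splitDotAux] using this
      | cons a l =>
        rw [if_pos (by exact_mod_cast l.length.succ_pos)]
        have := ih (g ++ [((a :: l).length : Int)]) []
        simp only [List.length_nil, Nat.cast_zero] at this
        rw [this]
        simp
    · simp only [List.foldl_cons, altStep, if_pos (by simpa using hc), splitDotAux, if_neg hc]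
      have := ih g (c :: cur)
      simp only [List.length_cons] at this
      rw [← this]
      norm_num

-- altGroups computes exactly A's filtered piece lengths
theorem altGroups_eq (s : String) :
    altGroups s
      = (((PySem.Str.split? s ".").getD []).filter (fun e => decide (e ≠ ""))).map PySem.Str.len := by
  have hsplit : (PySem.Str.split? s ".").getD [] = (PySem.Chars.splitOn s.toList ['.']).map String.ofList := by
    have h := PySem.Str.split?_map s "."
    cases he : PySem.Str.split? s "." with
    | none =>
      rw [he] at h
      simp [PySem.Chars.split?] at h
    | some parts =>
      rw [he] at h
      simp only [Option.map_some, PySem.Chars.split?] at h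
      rw [if_neg (by simp)] at h
      simp only [Option.getD_some]
      have hp : parts.map String.toList = PySem.Chars.splitOn s.toList ['.'] := by
        simpa using h
      rw [← hp]
      rw [List.map_map]
      conv_lhs => rw [show parts = parts.map (String.ofList ∘ String.toList) by
        simp [Function.comp_def, String.ofList_toList]]
  rw [hsplit, splitOn_dot]
  have hscan := scan_spec s.toList [] []
  simp only [List.length_nil, Nat.cast_zero, List.nil_append] at hscan
  have hgroups : altGroups s = altFinish (s.toList.foldl altStep ([], 0)) := rfl
  rw [hgroups, hscan, List.filter_map, List.map_map]
  have hofList_empty : ∀ p : List Char, String.ofList p = "" ↔ p = [] := by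
    intro p
    constructor
    · intro he
      simpa using congrArg String.toList he
    · intro he
      rw [he]
  have hpq : ((fun e => decide (e ≠ "")) ∘ String.ofList) = fun p : List Char => !p.isEmpty := by
    funext p
    cases p <;> simp [Function.comp_apply, hofList_empty]
  rw [hpq]
  apply List.map_congr_left
  intro p _
  simp [Function.comp_apply, PySem.Str.len, String.toList_ofList]

-- ===== VERDICT (by name: the statement is the Claim_ definition above) =====
theorem CheckAgainstReq_spec : Claim_equal_CheckAgainstReq := by
  intro L Req _
  unfold Spec_CheckAgainstReq CheckAgainstReq CheckAgainstReq_alt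
  simp only
  rw [PySem.List.foldl_append_if]
  simp only [List.nil_append]
  congr 1
  funext v s
  rw [foldl_append_ite (fun e => e ≠ "") PySem.Str.len, altGroups_eq]
  simp
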